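-- pv_equiv track=rewrite | github.com/zahaale20/Disk-Simulator | diskSim.py | scan_algorithm
-- ===== SOURCE A (Python) =====
-- def process_requests(position, requests):
--     less = []
--     more = []
--     for request in requests:
--         if request <= position:
--             less.append(request)
--         elif request > position:
--             more.append(request)
--     return less, more
--
-- def scan_algorithm(initial_position, requests, disk_size=5000):
--     direction = "right"  # Initial movement direction
--     total_distance = 0
--     position = initial_position
--
--     sorted_requests = sorted(requests + [0, disk_size - 1])  # Includes the disk's bounds in the requests
--     less, more = process_requests(position, sorted_requests)
--
--     # If direction is right, process the more/greater than list first, then reverse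
--     if direction == "right":
--         for request in more:
--             total_distance += abs(position - request)
--             position = request
--
--         # After reaching the end, reverse the direction and process the 'less' list
--         if less:
--             total_distance += abs(position - 0)  # Move to start of disk before reversing direction
--             position = 0
--         for request in reversed(less):
--             total_distance += abs(position - request)
--             position = request
--
--     else:  # If initial direction is left, reverse the order of processing
--         for request in reversed(less):
--             total_distance += abs(position - request)
--             position = request
--         # Reverse direction at the start of the disk
--         if more:
--             total_distance += abs(position - (disk_size - 1))  # Move to end of the disk before reversing
--             position = disk_size - 1
--         for request in more:
--             total_distance += abs(position - request)
--             position = request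
--
--     return total_distance
-- ===== SOURCE B (Python) =====
-- def scan_algorithm(initial_position, requests, disk_size=5000):
--     # Closed-form SCAN distance without sorting: split once around the head,
--     # then only the extremes (max above, max/min at-or-below) matter, because
--     # each monotone walk telescopes to last-minus-first.
--     position = initial_position
--     reqs = requests + [0, disk_size - 1]
--     more = [r for r in reqs if r > position]
--     less = [r for r in reqs if r <= position]
--     total = 0
--     if more:
--         highest = max(more)
--         total += highest - position
--         position = highest
--     if less:
--         total += abs(position) + abs(max(less)) + (max(less) - min(less))
--     return total
-- ===== Notes on version B (the rewrite author's own statement) =====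
-- stated objective: faster
-- what changed: Replaces A's sort + partition + two telescoping walks with a single unsorted pass that keeps max-above-head and max/min-at-or-below-head, then returns the SCAN distance in closed form.
import Mathlib
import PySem

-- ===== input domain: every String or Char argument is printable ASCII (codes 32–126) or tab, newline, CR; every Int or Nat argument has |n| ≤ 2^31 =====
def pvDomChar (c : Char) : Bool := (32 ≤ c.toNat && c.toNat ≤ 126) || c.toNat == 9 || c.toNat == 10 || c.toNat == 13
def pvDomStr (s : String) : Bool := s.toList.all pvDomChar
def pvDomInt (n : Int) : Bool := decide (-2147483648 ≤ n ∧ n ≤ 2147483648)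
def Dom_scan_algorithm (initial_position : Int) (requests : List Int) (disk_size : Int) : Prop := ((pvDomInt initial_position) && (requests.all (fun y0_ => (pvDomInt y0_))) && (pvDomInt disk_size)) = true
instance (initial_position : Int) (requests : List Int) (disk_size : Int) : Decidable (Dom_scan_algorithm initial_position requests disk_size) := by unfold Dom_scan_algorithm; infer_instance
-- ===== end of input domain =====

-- ===== PORT A =====
-- literal transliteration of A: sort requests plus the disk bounds, partition
-- around the head, then walk the upper run, jump to 0, walk the lower run reversed.
def process_requests (position : Int) (requests : List Int) : List Int × List Int :=
  requests.foldl
    (fun (acc : List Int × List Int) request =>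
      if request ≤ position then (acc.1 ++ [request], acc.2)
      else if request > position then (acc.1, acc.2 ++ [request])
      else acc)
    ([], [])

def scan_algorithm (initial_position : Int) (requests : List Int) (disk_size : Int) : Int :=
  let direction : String := "right"
  let total_distance : Int := 0
  let position : Int := initial_position
  let sorted_requests := PySem.List.sorted (requests ++ [0, disk_size - 1]) (fun x => x) false
  let lm := process_requests position sorted_requests
  let less := lm.1
  let more := lm.2
  if direction = "right" then
    let s1 := more.foldl (fun (s : Int × Int) request => (s.1 + |s.2 - request|, request))
      (total_distance, position)
    let s2 := if less ≠ [] then (s1.1 + |s1.2 - 0|, (0 : Int)) else s1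
    let s3 := less.reverse.foldl (fun (s : Int × Int) request => (s.1 + |s.2 - request|, request)) s2
    s3.1
  else
    let s1 := less.reverse.foldl (fun (s : Int × Int) request => (s.1 + |s.2 - request|, request))
      (total_distance, position)
    let s2 := if more ≠ [] then (s1.1 + |s1.2 - (disk_size - 1)|, disk_size - 1) else s1
    let s3 := more.foldl (fun (s : Int × Int) request => (s.1 + |s.2 - request|, request)) s2
    s3.1

-- ===== PORT B =====
-- literal transliteration of B (Source B): split the requests-plus-bounds list once
-- around the head, then combine the extremes of each side in closed form.
def scan_algorithm_alt (initial_position : Int) (requests : List Int) (disk_size : Int) : Int :=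
  let position : Int := initial_position
  let reqs := requests ++ [0, disk_size - 1]
  let more := reqs.filter (fun r => decide (r > position))
  let less := reqs.filter (fun r => decide (r ≤ position))
  let tp : Int × Int :=
    match PySem.List.max? more (fun x => x) with
    | some highest => (highest - position, highest)
    | none => (0, position)
  match PySem.List.max? less (fun x => x), PySem.List.min? less (fun x => x) with
  | some mx, some mn => tp.1 + |tp.2| + |mx| + (mx - mn)
  | _, _ => tp.1

-- ===== PRECONDITION & SPEC =====
def Spec_scan_algorithm (initial_position : Int) (requests : List Int) (disk_size : Int) (out : Int) : Prop := out = scan_algorithm_alt initial_position requests disk_size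
instance (initial_position : Int) (requests : List Int) (disk_size : Int) (out : Int) : Decidable (Spec_scan_algorithm initial_position requests disk_size out) := by unfold Spec_scan_algorithm; infer_instance

-- ===== CLAIM (what is proved, stated in full; the proofs are below) =====
def Claim_equal_scan_algorithm : Prop := ∀ (initial_position : Int) (requests : List Int) (disk_size : Int), Dom_scan_algorithm initial_position requests disk_size → Spec_scan_algorithm initial_position requests disk_size (scan_algorithm initial_position requests disk_size)

-- ===== LEMMAS AND PROOFS =====

-- the head-movement step both walks use
def pvStep (s : Int × Int) (r : Int) : Int × Int := (s.1 + |s.2 - r|, r)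
lemma max?_id_perm {l₁ l₂ : List Int} (h : l₁.Perm l₂) :
    PySem.List.max? l₁ (fun x => x) = PySem.List.max? l₂ (fun x => x) := by
  cases e1 : PySem.List.max? l₁ (fun x => x) with
  | none =>
    rw [PySem.List.max?_eq_none_iff] at e1
    rw [eq_comm, PySem.List.max?_eq_none_iff]
    exact (e1 ▸ h.symm).eq_nil
  | some a =>
    cases e2 : PySem.List.max? l₂ (fun x => x) with
    | none =>
      rw [PySem.List.max?_eq_none_iff] at e2
      have h1 : l₁ = [] := (e2 ▸ h).eq_nil
      rw [h1, show PySem.List.max? ([] : List Int) (fun x => x) = none from rfl] at e1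
      exact absurd e1 (by simp)
    | some b =>
      have hab : a ≤ b := by
        simpa using PySem.List.max?_isMax e2 a (h.mem_iff.mp (PySem.List.max?_mem e1))
      have hba : b ≤ a := by
        simpa using PySem.List.max?_isMax e1 b (h.mem_iff.mpr (PySem.List.max?_mem e2))
      rw [le_antisymm hab hba]

lemma min?_id_perm {l₁ l₂ : List Int} (h : l₁.Perm l₂) :
    PySem.List.min? l₁ (fun x => x) = PySem.List.min? l₂ (fun x => x) := by
  cases e1 : PySem.List.min? l₁ (fun x => x) with
  | none =>
    rw [PySem.List.min?_eq_none_iff] at e1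
    rw [eq_comm, PySem.List.min?_eq_none_iff]
    exact (e1 ▸ h.symm).eq_nil
  | some a =>
    cases e2 : PySem.List.min? l₂ (fun x => x) with
    | none =>
      rw [PySem.List.min?_eq_none_iff] at e2
      have h1 : l₁ = [] := (e2 ▸ h).eq_nil
      rw [h1, show PySem.List.min? ([] : List Int) (fun x => x) = none from rfl] at e1
      exact absurd e1 (by simp)
    | some b =>
      have hab : a ≤ b := by
        simpa using PySem.List.min?_isMin e1 b (h.mem_iff.mpr (PySem.List.min?_mem e2))
      have hba : b ≤ a := by
        simpa using PySem.List.min?_isMin e2 a (h.mem_iff.mp (PySem.List.min?_mem e1))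
      rw [le_antisymm hab hba]

lemma foldl_max_pairwise : ∀ (xs : List Int) (x : Int),
    (x :: xs).Pairwise (· ≤ ·) → xs.foldl max x = (x :: xs).getLastD 0 := by
  intro xs
  induction xs with
  | nil => intro x _; rfl
  | cons y ys ih =>
    intro x h
    rw [List.pairwise_cons] at h
    have hxy : x ≤ y := h.1 y (by simp)
    rw [List.foldl_cons, max_eq_right hxy]
    have := ih y h.2
    simp only [List.getLastD_cons] at this ⊢
    exact this

lemma foldl_min_pairwise : ∀ (xs : List Int) (x : Int),
    (x :: xs).Pairwise (· ≤ ·) → xs.foldl min x = x := by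
  intro xs
  induction xs with
  | nil => intro x _; rfl
  | cons y ys ih =>
    intro x h
    rw [List.pairwise_cons] at h
    have hxy : x ≤ y := h.1 y (by simp)
    rw [List.foldl_cons, min_eq_left hxy]
    refine ih x ?_
    rw [List.pairwise_cons]
    exact ⟨fun z hz => h.1 z (by simp [hz]), (List.pairwise_cons.mp h.2).2⟩

lemma telescope_asc : ∀ (xs : List Int) (x t q : Int),
    (x :: xs).Pairwise (· ≤ ·) →
    (x :: xs).foldl pvStep (t, q)
      = (t + |q - x| + ((x :: xs).getLastD 0 - x), (x :: xs).getLastD 0) := by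
  intro xs
  induction xs with
  | nil => intro x t q _; simp [pvStep]
  | cons y ys ih =>
    intro x t q h
    rw [List.pairwise_cons] at h
    have hxy : x ≤ y := h.1 y (by simp)
    have step1 : (x :: y :: ys).foldl pvStep (t, q) = (y :: ys).foldl pvStep (t + |q - x|, x) := rfl
    rw [step1, ih y (t + |q - x|) x h.2]
    have : |x - y| = y - x := by rw [abs_sub_comm]; exact abs_of_nonneg (by omega)
    simp only [List.getLastD_cons, this, Prod.mk.injEq]
    exact ⟨by ring, trivial⟩

lemma telescope_rev : ∀ (ls : List Int), ls.Pairwise (· ≤ ·) → ls ≠ [] → ∀ t q : Int,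
    ls.reverse.foldl pvStep (t, q)
      = (t + |q - ls.getLastD 0| + (ls.getLastD 0 - ls.headD 0), ls.headD 0) := by
  intro ls
  induction ls with
  | nil => intro _ h; exact absurd rfl h
  | cons x xs ih =>
    intro h _ t q
    rw [List.pairwise_cons] at h
    cases xs with
    | nil => simp [pvStep]
    | cons y ys =>
      have hne : (y :: ys) ≠ [] := by simp
      have hrev : (x :: y :: ys).reverse = (y :: ys).reverse ++ [x] := by simp
      rw [hrev, List.foldl_append, ih h.2 hne t q]
      have hxh : x ≤ y := h.1 y (by simp)
      have habs : |y - x| = y - x := abs_of_nonneg (by omega)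
      simp only [List.foldl_cons, List.foldl_nil, pvStep, habs, List.getLastD_cons,
        List.headD_cons, Prod.mk.injEq]
      exact ⟨by ring, trivial⟩

lemma pr_aux (p : Int) : ∀ (l : List Int) (a b : List Int),
    l.foldl
      (fun (acc : List Int × List Int) request =>
        if request ≤ p then (acc.1 ++ [request], acc.2)
        else if request > p then (acc.1, acc.2 ++ [request])
        else acc)
      (a, b)
    = (a ++ l.filter (fun r => decide (r ≤ p)), b ++ l.filter (fun r => decide (p < r))) := by
  intro l
  induction l with
  | nil => intro a b; simp
  | cons x xs ih =>
    intro a b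
    by_cases hx : x ≤ p
    · simp only [List.foldl_cons, if_pos hx, ih, List.filter_cons]
      have h2 : ¬ (p < x) := by omega
      simp [hx, h2]
    · have hx' : x > p := by omega
      simp only [List.foldl_cons, if_neg hx, if_pos hx', ih, List.filter_cons]
      simp [hx, hx']

lemma process_requests_eq (p : Int) (l : List Int) :
    process_requests p l
      = (l.filter (fun r => decide (r ≤ p)), l.filter (fun r => decide (p < r))) := by
  unfold process_requests
  simpa using pr_aux p l [] []

-- ===== VERDICT (by name: the statement is the Claim_ definition above) =====
theorem scan_algorithm_spec : Claim_equal_scan_algorithm := by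
  intro p l ds _
  unfold Spec_scan_algorithm scan_algorithm scan_algorithm_alt
  simp only [ne_eq, ite_not]
  simp only [if_true]
  rw [process_requests_eq]
  set base := l ++ [0, ds - 1] with hbase
  set S := PySem.List.sorted base (fun x => x) false with hS
  have hperm : S.Perm base := PySem.List.sorted_perm base (fun x => x) false
  have hpair : S.Pairwise (· ≤ ·) := by
    simpa using PySem.List.sorted_pairwise base (fun x => x)
  set less := S.filter (fun r => decide (r ≤ p)) with hlessdef
  set more := S.filter (fun r => decide (p < r)) with hmoredef
  have hpl : less.Pairwise (· ≤ ·) := hpair.filter _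
  have hpm : more.Pairwise (· ≤ ·) := hpair.filter _
  have hMp : PySem.List.max? (base.filter (fun r => decide (p < r))) (fun x => x)
      = PySem.List.max? more (fun x => x) := max?_id_perm (hperm.filter _).symm
  have hLmax : PySem.List.max? (base.filter (fun r => decide (r ≤ p))) (fun x => x)
      = PySem.List.max? less (fun x => x) := max?_id_perm (hperm.filter _).symm
  have hLmin : PySem.List.min? (base.filter (fun r => decide (r ≤ p))) (fun x => x)
      = PySem.List.min? less (fun x => x) := min?_id_perm (hperm.filter _).symm
  rw [hMp, hLmax, hLmin]
  have hstep : (fun (s : Int × Int) request => (s.1 + |s.2 - request|, request)) = pvStep := rfl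
  rw [hstep]
  have hmemM : ∀ x ∈ more, p < x := by
    intro x hx
    rw [hmoredef] at hx
    simpa using (List.mem_filter.mp hx).2
  clear_value base S less more
  clear hbase hS hlessdef hmoredef hperm hpair hMp hLmax hLmin hstep
  rcases more with _ | ⟨m0, mt⟩ <;> rcases less with _ | ⟨l0, lt⟩
  · -- both empty
    simp [PySem.List.max?, PySem.List.min?]
  · -- more empty, less = l0 :: lt
    have hL : PySem.List.max? (l0 :: lt) (fun x => x) = some (lt.getLastD l0) := by
      rw [PySem.List.max?_id_cons, foldl_max_pairwise lt l0 hpl, List.getLastD_cons]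
    have hN : PySem.List.min? (l0 :: lt) (fun x => x) = some l0 := by
      rw [PySem.List.min?_id_cons, foldl_min_pairwise lt l0 hpl]
    rw [hL, hN, show PySem.List.max? ([] : List Int) (fun x => x) = none from rfl]
    simp only [List.foldl_nil, reduceCtorEq, if_false]
    rw [telescope_rev (l0 :: lt) hpl (by simp)]
    have h1 : |(0 : Int) - (l0 :: lt).getLastD 0| = |(l0 :: lt).getLastD 0| := by
      rw [zero_sub, abs_neg]
    simp only [List.getLastD_cons, List.headD_cons, sub_zero] at h1 ⊢
    rw [h1]
  · -- more = m0 :: mt, less empty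
    have hM : PySem.List.max? (m0 :: mt) (fun x => x) = some (mt.getLastD m0) := by
      rw [PySem.List.max?_id_cons, foldl_max_pairwise mt m0 hpm, List.getLastD_cons]
    rw [hM, show PySem.List.max? ([] : List Int) (fun x => x) = none from rfl,
      show PySem.List.min? ([] : List Int) (fun x => x) = none from rfl]
    have hpm0 : p < m0 := hmemM m0 (by simp)
    have habs : |p - m0| = m0 - p := by
      rw [abs_sub_comm]; exact abs_of_nonneg (by omega)
    simp only [List.foldl_nil, List.reverse_nil, if_true]
    rw [telescope_asc mt m0 0 p hpm]
    simp only [List.getLastD_cons, habs]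
    ring
  · -- more = m0 :: mt, less = l0 :: lt
    have hM : PySem.List.max? (m0 :: mt) (fun x => x) = some (mt.getLastD m0) := by
      rw [PySem.List.max?_id_cons, foldl_max_pairwise mt m0 hpm, List.getLastD_cons]
    have hL : PySem.List.max? (l0 :: lt) (fun x => x) = some (lt.getLastD l0) := by
      rw [PySem.List.max?_id_cons, foldl_max_pairwise lt l0 hpl, List.getLastD_cons]
    have hN : PySem.List.min? (l0 :: lt) (fun x => x) = some l0 := by
      rw [PySem.List.min?_id_cons, foldl_min_pairwise lt l0 hpl]
    rw [hM, hL, hN]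
    have hpm0 : p < m0 := hmemM m0 (by simp)
    have habs : |p - m0| = m0 - p := by
      rw [abs_sub_comm]; exact abs_of_nonneg (by omega)
    simp only [reduceCtorEq, if_false]
    rw [telescope_asc mt m0 0 p hpm, telescope_rev (l0 :: lt) hpl (by simp)]
    have h1 : |(0 : Int) - (l0 :: lt).getLastD 0| = |(l0 :: lt).getLastD 0| := by
      rw [zero_sub, abs_neg]
    simp only [List.getLastD_cons, List.headD_cons, sub_zero, habs] at h1 ⊢
    rw [h1]
    ring
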